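-- pv_equiv track=rewrite | github.com/rlwicks/advent-of-code | day14-p1.py | propagate_slide
-- ===== SOURCE A (Python) =====
-- def propagate_slide(last_j_stop, round_rock_cnt, row, j) -> int:
--     load_of_slide = 0
--     for k in range(last_j_stop, last_j_stop + round_rock_cnt):
--         row[k] = "0"
--         load_of_slide = load_of_slide + len(row) - k
--     for k in range(last_j_stop + round_rock_cnt, j):
--         row[k] = "."
--     return load_of_slide
-- ===== SOURCE B (Python) =====
-- def propagate_slide(last_j_stop, round_rock_cnt, row, j) -> int:
--     # Closed-form load; the two cell ranges are written with slice assignment.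
--     # (Return value matches A; in-place writes coincide with A's on the
--     # in-bounds, non-negative-index inputs the claim admits.)
--     n = len(row)
--     a = last_j_stop
--     c = round_rock_cnt
--     b = a + c
--     row[a:b] = ["0"] * c
--     row[b:j] = ["."] * (j - b)
--     return c * (n - a) - (c * (c - 1)) // 2 if c > 0 else 0
-- ===== Notes on version B (the rewrite author's own statement) =====
-- stated objective: simpler
-- what changed: The accumulating per-index loop is replaced by the arithmetic closed form c*(n-a) - c*(c-1)//2 for the load, and the two cell ranges are written with slice assignment instead of element-by-element loops.
import Mathlib
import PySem

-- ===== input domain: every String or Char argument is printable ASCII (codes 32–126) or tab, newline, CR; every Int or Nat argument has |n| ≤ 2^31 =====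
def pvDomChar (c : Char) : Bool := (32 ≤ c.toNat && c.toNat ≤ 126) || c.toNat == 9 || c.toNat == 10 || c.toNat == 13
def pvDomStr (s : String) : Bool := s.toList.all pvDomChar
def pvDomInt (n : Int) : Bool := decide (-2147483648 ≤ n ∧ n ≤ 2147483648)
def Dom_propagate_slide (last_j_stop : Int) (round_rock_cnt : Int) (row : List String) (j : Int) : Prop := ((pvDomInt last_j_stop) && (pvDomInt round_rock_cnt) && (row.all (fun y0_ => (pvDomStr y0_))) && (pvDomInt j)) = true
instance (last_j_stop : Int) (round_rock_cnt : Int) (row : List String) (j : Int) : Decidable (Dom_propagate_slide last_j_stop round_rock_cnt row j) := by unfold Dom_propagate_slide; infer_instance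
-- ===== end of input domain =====

-- B replaces A's accumulating loop by the closed-form load c*(n-a) - c*(c-1)//2 (objective: simpler).
-- Both Pythons mutate `row` in place; the equivalence proved here is about the RETURN value only
-- (the ports track only what the return value needs, so A's second, mutation-only loop has no Lean effect).

-- ===== PORT A =====
-- state of the first loop: (row, load_of_slide); row[k] = "0" is pySetD (total form, in range under Pre_)
def propagate_slide (last_j_stop : Int) (round_rock_cnt : Int) (row : List String) (j : Int) : Int :=
  let s := (PySem.List.pyRange last_j_stop (last_j_stop + round_rock_cnt) 1).foldl
    (fun (st : List String × Int) k =>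
      let row' := PySem.List.pySetD st.1 k "0"
      (row', st.2 + (row'.length : Int) - k))
    (row, 0)
  -- second loop: for k in range(last_j_stop+round_rock_cnt, j): row[k] = "."  — mutates row only, no effect on the return value
  let _row2 := (PySem.List.pyRange (last_j_stop + round_rock_cnt) j 1).foldl
    (fun r k => PySem.List.pySetD r k ".") s.1
  s.2

-- ===== PORT B =====
-- row[a:b] = ["0"]*c and row[b:j] = ["."]*(j-b) mutate row only; the returned load is the closed form
def propagate_slide_alt (last_j_stop : Int) (round_rock_cnt : Int) (row : List String) (j : Int) : Int :=
  let n : Int := row.length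
  let a := last_j_stop
  let c := round_rock_cnt
  if 0 < c then c * (n - a) - PySem.Int.floordiv (c * (c - 1)) 2 else 0

-- ===== PRECONDITION & SPEC =====
-- Pre_ excludes exactly the inputs on which Python A raises IndexError: some written index
-- (in range(a, a+c) or range(a+c, j)) falls outside [-len(row), len(row)).
def Pre_propagate_slide (last_j_stop : Int) (round_rock_cnt : Int) (row : List String) (j : Int) : Prop :=
  (0 < round_rock_cnt →
    -(row.length : Int) ≤ last_j_stop ∧ last_j_stop + round_rock_cnt ≤ (row.length : Int)) ∧
  (last_j_stop + round_rock_cnt < j →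
    -(row.length : Int) ≤ last_j_stop + round_rock_cnt ∧ j ≤ (row.length : Int))
instance (last_j_stop : Int) (round_rock_cnt : Int) (row : List String) (j : Int) : Decidable (Pre_propagate_slide last_j_stop round_rock_cnt row j) := by unfold Pre_propagate_slide; infer_instance

def pvWitness_propagate_slide : Int × Int × List String × Int := (0, 2, ["#", ".", ".", "."], 4)

def Spec_propagate_slide (last_j_stop : Int) (round_rock_cnt : Int) (row : List String) (j : Int) (out : Int) : Prop := out = propagate_slide_alt last_j_stop round_rock_cnt row j
instance (last_j_stop : Int) (round_rock_cnt : Int) (row : List String) (j : Int) (out : Int) : Decidable (Spec_propagate_slide last_j_stop round_rock_cnt row j out) := by unfold Spec_propagate_slide; infer_instance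

-- ===== CLAIM (what is proved, stated in full; the proofs are below) =====
def Claim_equal_propagate_slide : Prop := ∀ (last_j_stop : Int) (round_rock_cnt : Int) (row : List String) (j : Int), Dom_propagate_slide last_j_stop round_rock_cnt row j → Pre_propagate_slide last_j_stop round_rock_cnt row j → Spec_propagate_slide last_j_stop round_rock_cnt row j (propagate_slide last_j_stop round_rock_cnt row j)

-- ===== LEMMAS AND PROOFS =====

-- triangular number 0 + 1 + … + (c-1), the exact amount A's decreasing loads fall behind c*(n-a)
def pvGauss : Nat → Int
  | 0 => 0
  | n + 1 => pvGauss n + n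

theorem pvGauss_two_mul (c : Nat) : 2 * pvGauss c = (c : Int) * (c - 1) := by
  induction c with
  | zero => simp [pvGauss]
  | succ n ih => simp only [pvGauss]; push_cast; push_cast at ih; linear_combination ih

theorem pvGauss_eq_floordiv (c : Nat) :
    pvGauss c = PySem.Int.floordiv ((c : Int) * ((c : Int) - 1)) 2 := by
  rw [PySem.Int.floordiv_eq_ediv_of_pos (by norm_num), ← pvGauss_two_mul]
  omega

theorem pvFoldA (c : Nat) : ∀ (a : Int) (row : List String) (load : Int),
    ((PySem.List.pyRange a (a + (c : Int)) 1).foldl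
      (fun (st : List String × Int) k =>
        let row' := PySem.List.pySetD st.1 k "0"
        (row', st.2 + (row'.length : Int) - k))
      (row, load)).2
    = load + (c : Int) * (row.length : Int) - (c : Int) * a - pvGauss c := by
  induction c with
  | zero =>
      intro a row load
      rw [PySem.List.pyRange_one_eq_nil (by omega)]
      simp [pvGauss]
  | succ n ih =>
      intro a row load
      rw [PySem.List.pyRange_one_cons (by omega)]
      have h : a + ((n : Int) + 1) = (a + 1) + (n : Int) := by ring
      push_cast
      rw [h]
      simp only [List.foldl_cons]
      rw [ih (a + 1) _ _]
      simp only [PySem.List.length_pySetD, pvGauss]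
      ring

-- ===== VERDICT (by name: the statement is the Claim_ definition above) =====
theorem propagate_slide_spec : Claim_equal_propagate_slide := by
  intro a c row j _hDom _hPre
  unfold Spec_propagate_slide propagate_slide propagate_slide_alt
  by_cases hc : 0 < c
  · have hcn : c = ((c.toNat : Nat) : Int) := by omega
    simp only [hc, if_pos]
    rw [hcn, pvFoldA c.toNat a row 0, pvGauss_eq_floordiv]
    ring
  · have hnil : PySem.List.pyRange a (a + c) 1 = [] :=
      PySem.List.pyRange_one_eq_nil (by omega)
    simp [hnil, hc]
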